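-- pv_equiv track=rewrite | github.com/Filianin/dbt-meta | src/dbt_meta/commands.py | _get_all_relations_recursive
-- ===== SOURCE A (Python) =====
-- from typing import Dict, List, Optional, Any
--
-- def _get_all_relations_recursive(
--     relation_map: Dict[str, List[str]],
--     node_id: str,
--     visited: Optional[set] = None
-- ) -> List[str]:
--     """
--     Recursively get all dependencies (parents or children)
--
--     Generic function that works for both parent_map and child_map.
--
--     Args:
--         relation_map: manifest['parent_map'] or manifest['child_map']
--         node_id: Starting node unique_id
--         visited: Set of already visited nodes (to avoid cycles)
--
--     Returns:
--         List of all related unique_ids (maintaining order, removing duplicates)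
--     """
--     if visited is None:
--         visited = set()
--
--     if node_id in visited:
--         return []
--
--     visited.add(node_id)
--     relations = relation_map.get(node_id, [])
--
--     all_relations = list(relations)
--     for relation_id in relations:
--         all_relations.extend(_get_all_relations_recursive(relation_map, relation_id, visited))
--
--     # Return unique items (preserving order with dict.fromkeys)
--     return list(dict.fromkeys(all_relations))
-- ===== SOURCE B (Python) =====
-- def _get_all_relations_recursive(relation_map, node_id, visited=None):
--     """Iterative DFS with an explicit stack and one shared edge accumulator;
--     dedup once at the end with a seen-set pass (no recursion, no per-level copies)."""
--     if visited is None: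
--         visited = set()
--     acc = []
--     stack = [node_id]
--     while stack:
--         n = stack.pop()
--         if n in visited:
--             continue
--         visited.add(n)
--         rels = relation_map.get(n, [])
--         acc.extend(rels)
--         stack.extend(reversed(rels))
--     seen = set()
--     out = []
--     for x in acc:
--         if x not in seen:
--             seen.add(x)
--             out.append(x)
--     return out
-- ===== Notes on version B (the rewrite author's own statement) =====
-- stated objective: alternative
-- what changed: A is a recursive function that rebuilds a fresh result list and re-deduplicates with dict.fromkeys at every recursion level; B is an iterative explicit-stack DFS loop appending edges to one shared accumulator, followed by a single seen-set dedup pass at the end.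
import Mathlib
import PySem

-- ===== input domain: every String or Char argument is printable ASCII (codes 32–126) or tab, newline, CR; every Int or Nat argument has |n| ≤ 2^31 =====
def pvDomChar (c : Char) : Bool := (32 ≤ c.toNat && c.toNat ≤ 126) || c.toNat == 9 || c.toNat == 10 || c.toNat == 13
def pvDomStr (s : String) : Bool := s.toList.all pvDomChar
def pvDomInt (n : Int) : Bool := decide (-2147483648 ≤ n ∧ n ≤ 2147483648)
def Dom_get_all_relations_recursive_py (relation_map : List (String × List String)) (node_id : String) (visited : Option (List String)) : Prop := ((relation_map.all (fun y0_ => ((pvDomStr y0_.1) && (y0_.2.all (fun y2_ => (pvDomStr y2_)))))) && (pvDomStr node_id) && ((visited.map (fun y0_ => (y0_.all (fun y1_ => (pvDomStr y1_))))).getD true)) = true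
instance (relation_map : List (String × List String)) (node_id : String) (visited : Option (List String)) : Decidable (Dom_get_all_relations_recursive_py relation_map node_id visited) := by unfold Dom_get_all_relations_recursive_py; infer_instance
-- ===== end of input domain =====

-- B replaces A's recursion (fresh result list + dict.fromkeys dedup at every level) by an iterative
-- explicit-stack DFS loop over one shared accumulator, deduplicated once at the end. Both A and B
-- mutate the caller's `visited` set identically; the equivalence proved is about the return value.

-- Recursion-depth fuel shared by both ports: Python's recursion/DFS depth is bounded by the number
-- of strings occurring in relation_map (each level marks a fresh node), so this fuel is never
-- exhausted on the inputs the ports model; it only makes the same computation total in Lean.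
def pvFuel (relation_map : List (String × List String)) : Nat :=
  (relation_map.flatMap (fun p => p.1 :: p.2)).length + 2

-- ===== PORT A =====
-- recursive body of A: returns the (per-level deduplicated) list and the updated visited set
def pvARec (m : List (String × List String)) : Nat → String → PySem.Set String → (List String × PySem.Set String)
  | 0, _, v => ([], v)
  | fuel+1, n, v =>
    if PySem.Set.contains v n then ([], v)
    else
      let v1 := PySem.Set.add v n
      let rels := PySem.Dict.getD (PySem.Dict.mk m) n []
      let st := rels.foldl (fun (p : List String × PySem.Set String) r =>
          (p.1 ++ (pvARec m fuel r p.2).1, (pvARec m fuel r p.2).2)) (rels, v1)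
      (PySem.List.dedup st.1, st.2)

def get_all_relations_recursive_py (relation_map : List (String × List String)) (node_id : String) (visited : Option (List String)) : List String :=
  (pvARec relation_map (pvFuel relation_map) node_id
    (match visited with | none => PySem.Set.empty | some l => PySem.Set.ofList l)).1

-- ===== PORT B =====
-- termination helper for the stack loop, cited by pvBLoop's decreasing_by proof: any adjacency
-- list in the map is shorter than pvFuel
theorem pv_rels_len_lt (m : List (String × List String)) (n : String) :
    (PySem.Dict.getD (PySem.Dict.mk m) n []).length < pvFuel m := by
  unfold pvFuel
  simp only [PySem.Dict.getD, PySem.Dict.get?]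
  cases hf : List.find? (fun p => p.1 == n) m with
  | none => simp
  | some p =>
    have hp : p ∈ m := List.mem_of_find?_eq_some hf
    simp only [Option.map_some, Option.getD_some]
    have h1 : p.2.length + 1 ≤ (m.map (fun q => (q.1 :: q.2).length)).sum := by
      have : (p.1 :: p.2).length ∈ m.map (fun q => (q.1 :: q.2).length) :=
        List.mem_map.2 ⟨p, hp, rfl⟩
      have := List.single_le_sum (fun x _ => Nat.zero_le x) _ this
      simpa using this
    have h2 : (m.flatMap (fun q => q.1 :: q.2)).length
        = (m.map (fun q => (q.1 :: q.2).length)).sum := by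
      simp [List.length_flatMap]
    omega

-- B's while-loop over an explicit stack (Python pops from the END of the list and pushes
-- reversed(rels); the Lean stack keeps its TOP at the HEAD, so pop = head and the push is
-- `rels ++ stack` in order — the same traversal). Each stack entry carries a depth fuel,
-- a termination device only (the zero branch is never reached: depth ≤ #distinct nodes < pvFuel).
def pvBLoop (m : List (String × List String)) :
    List (String × Nat) → PySem.Set String × List String → PySem.Set String × List String
  | [], st => st
  | (n, f) :: stack, st =>
    if PySem.Set.contains st.1 n then pvBLoop m stack st
    else
      match f with
      | 0 => pvBLoop m stack st
      | Nat.succ f' =>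
        let rels := PySem.Dict.getD (PySem.Dict.mk m) n []
        pvBLoop m (rels.map (fun r => (r, f')) ++ stack) (PySem.Set.add st.1 n, st.2 ++ rels)
termination_by stack _ => (stack.map (fun p => (pvFuel m) ^ p.2)).sum
decreasing_by
  · have : 0 < (pvFuel m) ^ f := Nat.pow_pos (by unfold pvFuel; omega)
    simp only [List.map_cons, List.sum_cons]
    omega
  · have : 0 < (pvFuel m) ^ 0 := Nat.pow_pos (by unfold pvFuel; omega)
    simp only [List.map_cons, List.sum_cons]
    omega
  · simp only [List.map_cons, List.sum_cons, List.map_append, List.sum_append, List.map_map]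
    have hlen : ((PySem.Dict.getD (PySem.Dict.mk m) n []).map
        ((fun p => (pvFuel m) ^ p.2) ∘ (fun r => (r, f')))).sum
        = (PySem.Dict.getD (PySem.Dict.mk m) n []).length * (pvFuel m) ^ f' := by
      simp [Function.comp_def, List.map_const', List.sum_replicate, Nat.mul_comm]
    rw [hlen]
    have h1 : (PySem.Dict.getD (PySem.Dict.mk m) n []).length * (pvFuel m) ^ f'
        < (pvFuel m) * (pvFuel m) ^ f' :=
      Nat.mul_lt_mul_of_lt_of_le (pv_rels_len_lt m n) (Nat.le_refl _)
        (Nat.pow_pos (by unfold pvFuel; omega))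
    have h2 : (pvFuel m) * (pvFuel m) ^ f' = (pvFuel m) ^ (Nat.succ f') := (pow_succ' _ _).symm
    omega

-- B's final dedup pass: one scan with a seen-set, keeping first occurrences
def pvDedupPass : PySem.Set String → List String → List String
  | _, [] => []
  | seen, x :: xs =>
    if PySem.Set.contains seen x then pvDedupPass seen xs
    else x :: pvDedupPass (PySem.Set.add seen x) xs

def get_all_relations_recursive_py_alt (relation_map : List (String × List String)) (node_id : String) (visited : Option (List String)) : List String :=
  pvDedupPass PySem.Set.empty
    (pvBLoop relation_map [(node_id, pvFuel relation_map)]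
      ((match visited with | none => PySem.Set.empty | some l => PySem.Set.ofList l), [])).2

-- ===== PRECONDITION & SPEC =====
def Spec_get_all_relations_recursive_py (relation_map : List (String × List String)) (node_id : String) (visited : Option (List String)) (out : List String) : Prop := out = get_all_relations_recursive_py_alt relation_map node_id visited
instance (relation_map : List (String × List String)) (node_id : String) (visited : Option (List String)) (out : List String) : Decidable (Spec_get_all_relations_recursive_py relation_map node_id visited out) := by unfold Spec_get_all_relations_recursive_py; infer_instance

-- ===== CLAIM (what is proved, stated in full; the proofs are below) =====
def Claim_equal_get_all_relations_recursive_py : Prop := ∀ (relation_map : List (String × List String)) (node_id : String) (visited : Option (List String)), Dom_get_all_relations_recursive_py relation_map node_id visited → Spec_get_all_relations_recursive_py relation_map node_id visited (get_all_relations_recursive_py relation_map node_id visited)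

-- ===== LEMMAS AND PROOFS =====

-- ghost recursive DFS: the common normal form both the stack loop and A's recursion reduce to
def pvBDfs (m : List (String × List String)) : Nat → String → PySem.Set String × List String → PySem.Set String × List String
  | 0, _, st => st
  | fuel+1, n, st =>
    if PySem.Set.contains st.1 n then st
    else
      let v1 := PySem.Set.add st.1 n
      let rels := PySem.Dict.getD (PySem.Dict.mk m) n []
      rels.foldl (fun st' r => pvBDfs m fuel r st') (v1, st.2 ++ rels)

-- `pvGo seen l`: the elements of l not in `seen`, first occurrences in order (dedup with an
-- explicit seen-set) — the common normal form both ports' dedups reduce to.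
def pvGo (seen : List String) : List String → List String
  | [] => []
  | x :: xs => if x ∈ seen then pvGo seen xs else x :: pvGo (x :: seen) xs

theorem pvGo_congr (l : List String) : ∀ s s' : List String, (∀ a, a ∈ s ↔ a ∈ s') → pvGo s l = pvGo s' l := by
  induction l with
  | nil => intros; rfl
  | cons x xs ih =>
    intro s s' h
    simp only [pvGo]
    by_cases hx : x ∈ s
    · rw [if_pos hx, if_pos ((h x).1 hx)]; exact ih s s' h
    · rw [if_neg hx, if_neg (fun c => hx ((h x).2 c))]
      congr 1
      exact ih _ _ (by intro a; simp [h a])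

theorem pvGo_mem (l : List String) : ∀ (s : List String) (a : String), a ∈ pvGo s l ↔ a ∈ l ∧ a ∉ s := by
  induction l with
  | nil => simp [pvGo]
  | cons x xs ih =>
    intro s a
    simp only [pvGo]
    by_cases hx : x ∈ s
    · rw [if_pos hx, ih]
      constructor
      · rintro ⟨h1, h2⟩; exact ⟨List.mem_cons.2 (Or.inr h1), h2⟩
      · rintro ⟨h1, h2⟩
        rcases List.mem_cons.1 h1 with rfl | h1
        · exact absurd hx h2
        · exact ⟨h1, h2⟩
    · rw [if_neg hx]
      constructor
      · intro h
        rcases List.mem_cons.1 h with rfl | h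
        · exact ⟨List.mem_cons.2 (Or.inl rfl), hx⟩
        · obtain ⟨h1, h2⟩ := (ih _ _).1 h
          exact ⟨List.mem_cons.2 (Or.inr h1), fun c => h2 (List.mem_cons.2 (Or.inr c))⟩
      · rintro ⟨h1, h2⟩
        rcases List.mem_cons.1 h1 with rfl | h1
        · exact List.mem_cons.2 (Or.inl rfl)
        · by_cases hax : a = x
          · exact List.mem_cons.2 (Or.inl hax)
          · exact List.mem_cons.2 (Or.inr ((ih _ _).2 ⟨h1, fun c => (List.mem_cons.1 c).elim hax h2⟩))

theorem pvGo_append (xs : List String) : ∀ (s ys : List String), pvGo s (xs ++ ys) = pvGo s xs ++ pvGo (xs ++ s) ys := by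
  induction xs with
  | nil => intro s ys; simp [pvGo]
  | cons x xs ih =>
    intro s ys
    simp only [List.cons_append, pvGo]
    by_cases hx : x ∈ s
    · rw [if_pos hx, if_pos hx, ih]
      congr 1
      apply pvGo_congr
      intro a
      simp only [List.mem_append, List.mem_cons]
      constructor
      · rintro (h | h)
        · exact Or.inr (Or.inl h)
        · exact Or.inr (Or.inr h)
      · rintro (rfl | h | h)
        · exact Or.inr hx
        · exact Or.inl h
        · exact Or.inr h
    · rw [if_neg hx, if_neg hx, ih]
      simp only [List.cons_append]
      congr 2
      apply pvGo_congr
      intro a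
      simp only [List.mem_append, List.mem_cons]
      tauto

theorem pvGo_idem (ys : List String) : ∀ (t s : List String), (∀ a ∈ t, a ∈ s) → pvGo s (pvGo t ys) = pvGo s ys := by
  induction ys with
  | nil => intros; rfl
  | cons y ys ih =>
    intro t s h
    simp only [pvGo]
    by_cases hy : y ∈ t
    · rw [if_pos hy, if_pos (h y hy)]; exact ih t s h
    · rw [if_neg hy]
      simp only [pvGo]
      by_cases hs : y ∈ s
      · rw [if_pos hs, if_pos hs]
        exact ih (y :: t) s (by intro a ha; rcases List.mem_cons.1 ha with rfl | ha; exact hs; exact h a ha)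
      · rw [if_neg hs, if_neg hs]
        congr 1
        exact ih (y :: t) (y :: s) (by intro a ha; rcases List.mem_cons.1 ha with rfl | ha; exact List.mem_cons_self; exact List.mem_cons_of_mem _ (h a ha))

-- foldl Set.add is pvGo appended to the accumulator
theorem foldl_add_eq_pvGo (l : List String) : ∀ (s s' : List String), (∀ a, a ∈ s ↔ a ∈ s') →
    l.foldl PySem.Set.add s = s ++ pvGo s' l := by
  induction l with
  | nil => intro s s' _; simp [pvGo]
  | cons x xs ih =>
    intro s s' h
    simp only [List.foldl_cons, pvGo, PySem.Set.add]
    by_cases hx : x ∈ s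
    · have hc : PySem.Set.contains s x = true := by simp [PySem.Set.contains, hx]
      rw [hc, if_pos ((h x).1 hx)]
      exact ih s s' h
    · have hc : PySem.Set.contains s x = false := by simp [PySem.Set.contains, hx]
      rw [hc, if_neg (fun c => hx ((h x).2 c))]
      simp only [Bool.false_eq_true, if_false]
      rw [ih (s ++ [x]) (x :: s') (by intro a; simp [List.mem_append, List.mem_cons, h a]; tauto)]
      simp

theorem dedup_eq_pvGo (l : List String) : PySem.List.dedup l = pvGo [] l := by
  have := foldl_add_eq_pvGo l [] [] (by intro a; rfl)
  simpa [PySem.List.dedup, PySem.Set.ofList] using this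

-- B's final pass is pvGo, up to membership-equality of the seen set
theorem pvDedupPass_eq_pvGo (l : List String) : ∀ (s s' : List String), (∀ a, a ∈ s ↔ a ∈ s') →
    pvDedupPass s l = pvGo s' l := by
  induction l with
  | nil => intros; rfl
  | cons x xs ih =>
    intro s s' h
    simp only [pvDedupPass, pvGo]
    by_cases hx : x ∈ s
    · have hc : PySem.Set.contains s x = true := by simp [PySem.Set.contains, hx]
      rw [hc, if_pos ((h x).1 hx)]
      exact ih s s' h
    · have hc : PySem.Set.contains s x = false := by simp [PySem.Set.contains, hx]
      rw [hc]
      simp only [Bool.false_eq_true, if_false]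
      rw [if_neg (fun c => hx ((h x).2 c))]
      congr 1
      apply ih
      intro a
      simp only [PySem.Set.add, hc, Bool.false_eq_true, if_false, List.mem_append,
        List.mem_cons, h a]
      tauto

-- B's ghost accumulator is only ever appended to
theorem pvBDfs_acc (m : List (String × List String)) : ∀ (fuel : Nat) (n : String) (v : PySem.Set String) (acc : List String),
    pvBDfs m fuel n (v, acc) = ((pvBDfs m fuel n (v, [])).1, acc ++ (pvBDfs m fuel n (v, [])).2) := by
  intro fuel
  induction fuel with
  | zero => intro n v acc; simp [pvBDfs]
  | succ fuel ih =>
    have hfold : ∀ (rels : List String) (v : PySem.Set String) (a b : List String),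
        rels.foldl (fun st' r => pvBDfs m fuel r st') (v, a ++ b)
          = ((rels.foldl (fun st' r => pvBDfs m fuel r st') (v, b)).1,
             a ++ (rels.foldl (fun st' r => pvBDfs m fuel r st') (v, b)).2) := by
      intro rels
      induction rels with
      | nil => intro v a b; simp
      | cons r rest ihr =>
        intro v a b
        simp only [List.foldl_cons]
        rw [ih r v (a ++ b), ih r v b]
        rw [List.append_assoc]
        exact ihr _ a _
    intro n v acc
    simp only [pvBDfs]
    by_cases hc : n ∈ v
    · simp [hc]
    · simp only [PySem.Set.contains]
      simp only [List.contains_eq_mem, hc, decide_false, Bool.false_eq_true, if_false]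
      rw [hfold _ _ acc _]
      simp

-- the same fact at the level of the ghost's sibling fold
theorem pvBFold_acc (m : List (String × List String)) (fuel : Nat) (rels : List String) :
    ∀ (v : PySem.Set String) (a : List String),
    rels.foldl (fun st' r => pvBDfs m fuel r st') (v, a)
      = ((rels.foldl (fun st' r => pvBDfs m fuel r st') (v, [])).1,
         a ++ (rels.foldl (fun st' r => pvBDfs m fuel r st') (v, [])).2) := by
  induction rels with
  | nil => intro v a; simp
  | cons r rest ihr =>
    intro v a
    simp only [List.foldl_cons]
    rw [pvBDfs_acc m fuel r v a, pvBDfs_acc m fuel r v []]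
    rw [ihr _ (a ++ _), ihr _ ([] ++ _)]
    simp

-- A's accumulator is only ever appended to
theorem pvAFold_acc (m : List (String × List String)) (fuel : Nat) (rels : List String) :
    ∀ (v : PySem.Set String) (a : List String),
    rels.foldl (fun (p : List String × PySem.Set String) r =>
        (p.1 ++ (pvARec m fuel r p.2).1, (pvARec m fuel r p.2).2)) (a, v)
      = (a ++ (rels.foldl (fun (p : List String × PySem.Set String) r =>
          (p.1 ++ (pvARec m fuel r p.2).1, (pvARec m fuel r p.2).2)) ([], v)).1,
         (rels.foldl (fun (p : List String × PySem.Set String) r =>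
          (p.1 ++ (pvARec m fuel r p.2).1, (pvARec m fuel r p.2).2)) ([], v)).2) := by
  induction rels with
  | nil => intros; simp
  | cons r rest ihr =>
    intro v a
    simp only [List.foldl_cons]
    rw [ihr _ (a ++ _), ihr _ ([] ++ _)]
    simp

-- main invariant: A's result is the dedup of the ghost DFS's raw accumulator, and both thread visited identically
theorem pvMain (m : List (String × List String)) : ∀ (fuel : Nat) (n : String) (v : PySem.Set String),
    pvARec m fuel n v = (pvGo [] (pvBDfs m fuel n (v, [])).2, (pvBDfs m fuel n (v, [])).1) := by
  intro fuel
  induction fuel with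
  | zero => intros; rfl
  | succ fuel ih =>
    have hF : ∀ (rels : List String) (v : PySem.Set String),
        ((rels.foldl (fun (p : List String × PySem.Set String) r =>
            (p.1 ++ (pvARec m fuel r p.2).1, (pvARec m fuel r p.2).2)) ([], v)).2
          = (rels.foldl (fun st' r => pvBDfs m fuel r st') (v, [])).1)
        ∧ (∀ s : List String,
            pvGo s (rels.foldl (fun (p : List String × PySem.Set String) r =>
              (p.1 ++ (pvARec m fuel r p.2).1, (pvARec m fuel r p.2).2)) ([], v)).1
            = pvGo s (rels.foldl (fun st' r => pvBDfs m fuel r st') (v, [])).2) := by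
      intro rels
      induction rels with
      | nil => intro v; exact ⟨rfl, fun s => rfl⟩
      | cons r rest ihr =>
        intro v
        simp only [List.foldl_cons]
        rw [ih r v]
        set raw := (pvBDfs m fuel r (v, [])).2 with hraw
        set v2 := (pvBDfs m fuel r (v, [])).1 with hv2
        rw [pvAFold_acc m fuel rest v2 ([] ++ pvGo [] raw)]
        have hB : pvBDfs m fuel r (v, []) = (v2, raw) := rfl
        rw [hB, pvBFold_acc m fuel rest v2 raw]
        obtain ⟨ihv, ihs⟩ := ihr v2
        refine ⟨ihv, ?_⟩
        intro s
        simp only [List.nil_append]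
        rw [pvGo_append, pvGo_append]
        congr 1
        · exact pvGo_idem raw [] s (by intro a ha; cases ha)
        · rw [pvGo_congr _ (pvGo [] raw ++ s) (raw ++ s)
            (by intro a; simp [List.mem_append, pvGo_mem])]
          exact ihs (raw ++ s)
    intro n v
    simp only [pvARec, pvBDfs]
    by_cases hc : n ∈ v
    · simp [hc, pvGo]
    · simp only [PySem.Set.contains]
      simp only [List.contains_eq_mem, hc, decide_false, Bool.false_eq_true, if_false]
      rw [pvAFold_acc m fuel (PySem.Dict.getD (PySem.Dict.mk m) n []) (PySem.Set.add v n) (PySem.Dict.getD (PySem.Dict.mk m) n [])]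
      rw [List.nil_append]
      rw [pvBFold_acc m fuel (PySem.Dict.getD (PySem.Dict.mk m) n []) (PySem.Set.add v n) (PySem.Dict.getD (PySem.Dict.mk m) n [])]
      obtain ⟨ihv, ihs⟩ := hF (PySem.Dict.getD (PySem.Dict.mk m) n []) (PySem.Set.add v n)
      refine Prod.ext ?_ ihv
      simp only
      rw [dedup_eq_pvGo, pvGo_append, pvGo_append]
      congr 1
      exact ihs _

-- the stack loop processes its top entry exactly like the ghost DFS, then continues
theorem pvBLoop_bdfs (m : List (String × List String)) : ∀ (f : Nat) (n : String) (stack : List (String × Nat)) (st : PySem.Set String × List String),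
    pvBLoop m ((n, f) :: stack) st = pvBLoop m stack (pvBDfs m f n st) := by
  intro f
  induction f with
  | zero =>
    intro n stack st
    simp only [pvBLoop, pvBDfs]
    split <;> rfl
  | succ f ih =>
    have hfold : ∀ (rels : List String) (stack : List (String × Nat)) (st : PySem.Set String × List String),
        pvBLoop m (rels.map (fun r => (r, f)) ++ stack) st
          = pvBLoop m stack (rels.foldl (fun st' r => pvBDfs m f r st') st) := by
      intro rels
      induction rels with
      | nil => intros; rfl
      | cons r rest ihr =>
        intro stack st
        simp only [List.map_cons, List.cons_append, List.foldl_cons]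
        rw [ih r _ st, ihr]
    intro n stack st
    by_cases hc : PySem.Set.contains st.1 n
    · simp only [pvBLoop, pvBDfs, hc, if_true]
    · simp only [pvBLoop, pvBDfs, hc, Bool.false_eq_true, if_false]
      rw [hfold]

-- ===== VERDICT (by name: the statement is the Claim_ definition above) =====
theorem get_all_relations_recursive_py_spec : Claim_equal_get_all_relations_recursive_py := by
  intro relation_map node_id visited _
  unfold Spec_get_all_relations_recursive_py get_all_relations_recursive_py get_all_relations_recursive_py_alt
  rw [pvBLoop_bdfs]
  have hnil : ∀ st : PySem.Set String × List String, pvBLoop relation_map [] st = st := by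
    intro st; simp [pvBLoop]
  rw [hnil, pvMain]
  exact (pvDedupPass_eq_pvGo _ [] [] (by intro a; rfl)).symm
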